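-- pv_equiv track=rewrite | github.com/pingpangqiu45/riu4_lqp | src/riu4_lqp/core.py | compute_index
-- ===== SOURCE A (Python) =====
-- def circular_1_segments(pattern):
--     P = len(pattern)
--     extended = pattern + pattern
--     segments = []
--     count = 0
--     for i in range(2 * P):
--         if extended[i] == 1:
--             count += 1
--         elif count > 0:
--             segments.append(count)
--             count = 0
--     if count > 0:
--         segments.append(count)
--     if pattern[0] == 1 and pattern[-1] == 1 and len(segments) > 1:
--         segments[0] += segments.pop()
--     return sorted(segments)
--
-- def compute_index(P, pattern):
--     segments = circular_1_segments(pattern)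
--     if len(segments) != 2:
--         raise ValueError("T1 == 4 but did not find exactly two 1-segments.")
--     X, Y = segments
--     if X == 1:
--         return Y
--     else:
--         return sum((P - 3 - 2 * (n - 1)) + (Y - X + 1) for n in range(1, X))
-- ===== SOURCE B (Python) =====
-- def compute_index(P, pattern):
--     # count circular run-starts: positions whose element is 1 and whose circular predecessor is not
--     starts = sum(1 for prev, cur in zip([pattern[-1]] + pattern, pattern)
--                  if cur == 1 and prev != 1)
--     if starts != 1:
--         raise ValueError("T1 == 4 but did not find exactly two 1-segments.")
--     S = pattern.count(1)
--     return S if S == 1 else (S - 1) * (P - S)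
-- ===== Notes on version B (the rewrite author's own statement) =====
-- stated objective: simpler
-- what changed: Instead of scanning the doubled pattern for run lengths, sorting them and summing an arithmetic series, B counts circular run-starts with one zip pass, counts the 1s, and returns the closed form (S-1)*(P-S) (or S when S=1).
import Mathlib
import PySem

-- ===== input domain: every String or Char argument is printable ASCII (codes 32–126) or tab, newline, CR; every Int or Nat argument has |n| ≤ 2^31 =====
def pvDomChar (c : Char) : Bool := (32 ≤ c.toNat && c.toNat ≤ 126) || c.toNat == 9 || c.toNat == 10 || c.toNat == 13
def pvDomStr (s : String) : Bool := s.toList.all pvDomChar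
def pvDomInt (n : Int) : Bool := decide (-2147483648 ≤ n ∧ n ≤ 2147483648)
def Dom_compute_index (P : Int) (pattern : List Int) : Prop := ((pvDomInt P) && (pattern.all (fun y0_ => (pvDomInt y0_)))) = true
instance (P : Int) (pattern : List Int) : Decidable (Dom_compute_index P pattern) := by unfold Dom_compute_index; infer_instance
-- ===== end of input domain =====

-- B replaces the scan of the doubled pattern + sort + summation loop by one circular
-- run-start count, one element count and a closed-form product (objective: simpler).

-- ===== PORT A =====
-- one step of the 'for i in range(2 * P)' loop body, state = (segments, count)
def ci_step (st : List Int × Int) (v : Int) : List Int × Int :=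
  if v = 1 then (st.1, st.2 + 1)
  else if 0 < st.2 then (st.1 ++ [st.2], 0)
  else (st.1, 0)

-- 'for i in range(2 * P): extended[i]' visits exactly the elements of extended in order,
-- so the loop is the fold of ci_step over extended.
def circular_1_segments (pattern : List Int) : List Int :=
  let extended := pattern ++ pattern
  let st := extended.foldl ci_step ([], 0)
  let segments := if 0 < st.2 then st.1 ++ [st.2] else st.1
  -- pattern[0] / pattern[-1]: IndexError only for pattern = [], excluded by Pre_
  let segments :=
    if (PySem.List.pyGet? pattern 0).getD 0 = 1 ∧ (PySem.List.pyGet? pattern (-1)).getD 0 = 1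
        ∧ 1 < segments.length then
      match segments with
      | [] => []
      | s0 :: rest => (s0 + rest.getLastD 0) :: rest.dropLast  -- segments[0] += segments.pop()
    else segments
  PySem.List.sorted segments (fun x => x) false

def compute_index (P : Int) (pattern : List Int) : Int :=
  let segments := circular_1_segments pattern
  if segments.length ≠ 2 then 0  -- Python raises ValueError here; excluded by Pre_
  else
    let X := segments.getD 0 0
    let Y := segments.getD 1 0
    if X = 1 then Y
    else ((PySem.List.pyRange 1 X 1).map (fun n => (P - 3 - 2 * (n - 1)) + (Y - X + 1))).sum

-- ===== PORT B =====
def compute_index_alt (P : Int) (pattern : List Int) : Int :=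
  match PySem.List.pyGet? pattern (-1) with
  | none => 0  -- pattern[-1]: IndexError on empty pattern; excluded by Pre_
  | some lastv =>
    let starts := ((lastv :: pattern).zip pattern).countP (fun q => q.2 == 1 && !(q.1 == 1))
    if starts ≠ 1 then 0  -- Python raises ValueError here; excluded by Pre_
    else
      let S : Int := (PySem.List.count pattern 1 : Int)
      if S = 1 then S else (S - 1) * (P - S)

-- ===== PRECONDITION & SPEC =====
-- Pre_ excludes exactly the inputs where the Python A raises: the empty pattern
-- (IndexError) and patterns whose 1-entries do not form exactly one circular run
-- strictly shorter than the pattern (ValueError "did not find exactly two 1-segments").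
def Pre_compute_index (P : Int) (pattern : List Int) : Prop :=
  pattern ≠ [] ∧
  ((pattern.getLastD 0 :: pattern).zip pattern).countP (fun q => q.2 == 1 && !(q.1 == 1)) = 1
instance (P : Int) (pattern : List Int) : Decidable (Pre_compute_index P pattern) := by
  unfold Pre_compute_index; infer_instance

def pvWitness_compute_index : Int × List Int := (4, [1, 1, 0, 0])

def Spec_compute_index (P : Int) (pattern : List Int) (out : Int) : Prop := out = compute_index_alt P pattern
instance (P : Int) (pattern : List Int) (out : Int) : Decidable (Spec_compute_index P pattern out) := by unfold Spec_compute_index; infer_instance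

-- ===== CLAIM (what is proved, stated in full; the proofs are below) =====
def Claim_equal_compute_index : Prop := ∀ (P : Int) (pattern : List Int), Dom_compute_index P pattern → Pre_compute_index P pattern → Spec_compute_index P pattern (compute_index P pattern)

-- ===== LEMMAS AND PROOFS =====

-- emitted run lengths of a scan started with an open run of length c
def emR (c : Int) : List Int → List Int
  | [] => []
  | x :: xs => if x = 1 then emR (c + 1) xs else (if 0 < c then [c] else []) ++ emR 0 xs

-- final open-run length of the same scan
def caR (c : Int) : List Int → Int
  | [] => c
  | x :: xs => if x = 1 then caR (c + 1) xs else caR 0 xs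

-- circular run-start counter, with the "previous element is 1" flag
def lsR : Bool → List Int → Nat
  | _, [] => 0
  | p, x :: xs => (if x = 1 ∧ p = false then 1 else 0) + lsR (x == 1) xs

theorem foldl_ci (l : List Int) : ∀ segs c,
    l.foldl ci_step (segs, c) = (segs ++ emR c l, caR c l) := by
  induction l with
  | nil => intro segs c; simp [emR, caR]
  | cons x xs ih =>
    intro segs c
    by_cases hx : x = 1
    · simp [List.foldl_cons, ci_step, hx, emR, caR, ih]
    · by_cases hc : 0 < c
      · simp [List.foldl_cons, ci_step, hx, hc, emR, caR, ih]
      · simp [List.foldl_cons, ci_step, hx, hc, emR, caR, ih]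


theorem caR_nonneg (l : List Int) : ∀ c, 0 ≤ c → 0 ≤ caR c l := by
  induction l with
  | nil => intro c hc; simpa [caR] using hc
  | cons x xs ih =>
    intro c hc
    by_cases hx : x = 1
    · simpa [caR, hx] using ih (c + 1) (by omega)
    · simpa [caR, hx] using ih 0 le_rfl


theorem emR_pos (l : List Int) : ∀ c, 0 ≤ c → ∀ x ∈ emR c l, 0 < x := by
  induction l with
  | nil => intro c _; simp [emR]
  | cons x xs ih =>
    intro c hc y hy
    by_cases hx : x = 1
    · exact ih (c + 1) (by omega) y (by simpa [emR, hx] using hy)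
    · have hy' : y ∈ (if 0 < c then [c] else []) ++ emR 0 xs := by simpa [emR, hx] using hy
      rcases List.mem_append.mp hy' with h' | h'
      · rcases List.mem_ite_nil_right.mp h' with ⟨h1, h2⟩
        have : y = c := by simpa using h2
        omega
      · exact ih 0 le_rfl y h'


theorem sum_emR (l : List Int) : ∀ c, 0 ≤ c →
    (emR c l).sum + caR c l = c + (List.count 1 l : Int) := by
  induction l with
  | nil => intro c _; simp [emR, caR]
  | cons x xs ih =>
    intro c hc0
    have hcount : List.count 1 (x :: xs) = (if x = 1 then 1 else 0) + List.count 1 xs := by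
      by_cases hx : x = 1 <;> simp [List.count_cons, hx] <;> omega
    by_cases hx : x = 1
    · have := ih (c + 1) (by omega)
      simp [emR, caR, hx, hcount] at this ⊢
      omega
    · have := ih 0 le_rfl
      by_cases hc : 0 < c <;> simp [emR, caR, hx, hc, hcount] at this ⊢ <;> omega


theorem zip_countP (l : List Int) : ∀ p : Int,
    ((p :: l).zip l).countP (fun q => q.2 == 1 && !(q.1 == 1)) = lsR (p == 1) l := by
  induction l with
  | nil => intro p; simp [lsR]
  | cons x xs ih =>
    intro p
    have hz : (p :: x :: xs).zip (x :: xs) = (p, x) :: ((x :: xs).zip xs) := rfl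
    rw [hz, List.countP_cons, ih x]
    by_cases hx : x = 1 <;> by_cases hp : p = 1 <;> simp [lsR, hx, hp] <;> omega


theorem runCount (l : List Int) : ∀ c, 0 ≤ c →
    (emR c l).length + (if 0 < caR c l then 1 else 0)
      = lsR (decide (0 < c)) l + (if 0 < c then 1 else 0) := by
  induction l with
  | nil => intro c _; simp [emR, caR, lsR]
  | cons x xs ih =>
    intro c hc0
    by_cases hx : x = 1
    · have := ih (c + 1) (by omega)
      by_cases hc : 0 < c <;>
        simp [emR, caR, lsR, hx, hc, beq_iff_eq, show (0:Int) < c + 1 by omega] at this ⊢ <;> omega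
    · have := ih 0 le_rfl
      have hbx : (x == 1) = false := by simp [hx]
      by_cases hc : 0 < c <;> simp [emR, caR, lsR, hx, hbx, hc] at this ⊢ <;> omega


theorem caR_pos_of_last_one (l : List Int) : ∀ c, 0 ≤ c → l.getLast? = some 1 → 0 < caR c l := by
  induction l with
  | nil => intro c _ h; simp at h
  | cons x xs ih =>
    intro c hc0 hlast
    cases xs with
    | nil =>
      simp at hlast
      simp [caR, hlast]
      omega
    | cons y ys =>
      have hl : (y :: ys).getLast? = some 1 := by
        simpa [List.getLast?_cons_cons] using hlast
      by_cases hx : x = 1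
      · simpa [caR, hx] using ih (c + 1) (by omega) hl
      · simpa [caR, hx] using ih 0 le_rfl hl


theorem caR_zero_of_last_ne (l : List Int) : ∀ c v, l.getLast? = some v → v ≠ 1 → caR c l = 0 := by
  induction l with
  | nil => intro c v h; simp at h
  | cons x xs ih =>
    intro c v hlast hv
    cases xs with
    | nil =>
      simp at hlast
      simp [caR, hlast ▸ hv, caR]
    | cons y ys =>
      have hl : (y :: ys).getLast? = some v := by
        simpa [List.getLast?_cons_cons] using hlast
      by_cases hx : x = 1
      · simpa [caR, hx] using ih (c + 1) v hl hv
      · simpa [caR, hx] using ih 0 v hl hv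


theorem emR_nil_of_pos (s : List Int) : ∀ c, 0 < c → emR c s = [] →
    (∀ x ∈ s, x = 1) ∧ caR c s = c + s.length := by
  induction s with
  | nil => intro c _ _; simp [caR]
  | cons x xs ih =>
    intro c hc hnil
    by_cases hx : x = 1
    · have hnil' : emR (c + 1) xs = [] := by simpa [emR, hx] using hnil
      rcases ih (c + 1) (by omega) hnil' with ⟨hall, hca⟩
      refine ⟨fun y hy => ?_, ?_⟩
      · rcases List.mem_cons.mp hy with rfl | hy'
        · exact hx
        · exact hall y hy'
      · simp [caR, hx, hca]
        omega
    · exfalso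
      have : (if 0 < c then [c] else []) ++ emR 0 xs = [] := by simpa [emR, hx] using hnil
      simp [hc] at this


theorem emR_nil_zero (l : List Int) : emR 0 l = [] →
    ∃ z s, l = z ++ s ∧ (∀ x ∈ z, x ≠ 1) ∧ (∀ x ∈ s, x = 1) := by
  induction l with
  | nil => exact fun _ => ⟨[], [], by simp⟩
  | cons x xs ih =>
    intro hnil
    by_cases hx : x = 1
    · have hnil' : emR 1 xs = [] := by simpa [emR, hx] using hnil
      rcases emR_nil_of_pos xs 1 one_pos hnil' with ⟨hall, _⟩
      exact ⟨[], x :: xs, by simp, by simp, fun y hy => by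
        rcases List.mem_cons.mp hy with rfl | hy'
        · exact hx
        · exact hall y hy'⟩
    · have hnil' : emR 0 xs = [] := by simpa [emR, hx] using hnil
      rcases ih hnil' with ⟨z, s, rfl, hz, hs⟩
      exact ⟨x :: z, s, by simp, fun y hy => by
        rcases List.mem_cons.mp hy with rfl | hy'
        · exact hx
        · exact hz y hy', hs⟩


theorem emR_ones (o : List Int) (ho : ∀ x ∈ o, x = 1) (r : List Int) : ∀ c,
    emR c (o ++ r) = emR (c + o.length) r ∧ caR c (o ++ r) = caR (c + o.length) r := by
  induction o with
  | nil => intro c; simp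
  | cons x xs ih =>
    intro c
    have hx : x = 1 := ho x (by simp)
    have ihx := ih (fun y hy => ho y (by simp [hy])) (c + 1)
    have hlen : c + ((x :: xs).length : Int) = (c + 1) + xs.length := by
      simp [List.length_cons]; omega
    refine ⟨?_, ?_⟩
    · rw [hlen, ← ihx.1]; simp [emR, hx]
    · rw [hlen, ← ihx.2]; simp [caR, hx]


theorem emR_nonones (z : List Int) (hz : ∀ x ∈ z, x ≠ 1) (hne : z ≠ []) (r : List Int) : ∀ c,
    emR c (z ++ r) = (if 0 < c then [c] else []) ++ emR 0 r ∧ caR c (z ++ r) = caR 0 r := by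
  induction z with
  | nil => exact absurd rfl hne
  | cons x xs ih =>
    intro c
    have hx : x ≠ 1 := hz x (by simp)
    cases xs with
    | nil => simp [emR, caR, hx]
    | cons y ys =>
      have ihx := ih (fun w hw => hz w (by simp [hw])) (by simp) 0
      have h1 : emR 0 ((y :: ys) ++ r) = emR 0 r := by simpa using ihx.1
      have h2 : caR 0 ((y :: ys) ++ r) = caR 0 r := by simpa using ihx.2
      constructor
      · show emR c (x :: ((y :: ys) ++ r)) = _
        rw [emR, if_neg hx, h1]
      · show caR c (x :: ((y :: ys) ++ r)) = _
        rw [caR, if_neg hx, h2]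


theorem lsR_all_ones (l : List Int) (h : ∀ x ∈ l, x = 1) : lsR true l = 0 := by
  induction l with
  | nil => simp [lsR]
  | cons x xs ih =>
    have hx : x = 1 := h x (by simp)
    simp [lsR, hx]
    exact ih (fun y hy => h y (by simp [hy]))


theorem lsR_head_ne (x : Int) (xs : List Int) (hx : x ≠ 1) (b : Bool) :
    lsR b (x :: xs) = lsR false (x :: xs) := by
  simp [lsR, hx]


theorem dropWhile_cons_head_false (p : Int → Bool) (l : List Int) (d : Int) (ds : List Int)
    (h : l.dropWhile p = d :: ds) : p d = false := by
  have hne : l.dropWhile p ≠ [] := by rw [h]; simp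
  have h2 := List.head_dropWhile_not p hne
  have h3 : (l.dropWhile p).head? = some d := by rw [h]; rfl
  rw [List.head?_eq_some_head hne] at h3
  rw [Option.some_inj.mp h3] at h2
  exact h2

-- the heart: under Pre_, A's sorted segment list is [S, S] with S = count of 1s, 1 ≤ S
theorem segs_eq (pattern : List Int) (h : pattern ≠ [])
    (h1 : lsR (pattern.getLastD 0 == 1) pattern = 1) :
    circular_1_segments pattern = [(List.count 1 pattern : Int), (List.count 1 pattern : Int)]
      ∧ 1 ≤ (List.count 1 pattern : Int) := by
  have hvlast : pattern.getLast? = some (pattern.getLast h) := List.getLast?_eq_getLast h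
  set v := pattern.getLast h with hvdef
  have hgd : pattern.getLastD 0 = v := by rw [List.getLastD_eq_getLast?, hvlast]; rfl
  set t := caR 0 pattern with htdef
  set e := emR 0 pattern with hedef
  set S : Int := (List.count 1 pattern : Int) with hSdef
  have hfold : (pattern ++ pattern).foldl ci_step ([], 0) = (e ++ emR t pattern, caR t pattern) := by
    rw [List.foldl_append, foldl_ci pattern [] 0]
    simpa using foldl_ci pattern e t
  have ht0 : 0 ≤ t := caR_nonneg _ 0 le_rfl
  have hsum : e.sum + t = S := by simpa using sum_emR pattern 0 le_rfl
  have hrc : e.length + (if 0 < t then 1 else 0) = lsR false pattern := by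
    simpa using runCount pattern 0 le_rfl
  have hget0 : PySem.List.pyGet? pattern 0 = pattern.head? := by
    cases pattern with
    | nil => simp at h
    | cons a l => simp [PySem.List.pyGet?_zero_cons]
  have hgetm1 : PySem.List.pyGet? pattern (-1) = some v := by
    rw [PySem.List.pyGet?_neg_one, hvlast]
  by_cases hv1 : v = 1
  · -- last element is 1
    have htpos : 0 < t := caR_pos_of_last_one pattern 0 le_rfl (hv1 ▸ hvlast)
    have h1x := h1
    rw [hgd] at h1x
    have h1' : lsR true pattern = 1 := by simpa [hv1] using h1x
    cases pattern with
    | nil => exact absurd rfl h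
    | cons x xs =>
    by_cases hx : x = 1
    · -- head and last are 1: the run wraps
      have hls2 : lsR false (x :: xs) = 2 := by
        have e1 : lsR false (x :: xs) = 1 + lsR true xs := by simp [lsR, hx]
        have e2 : lsR true (x :: xs) = lsR true xs := by simp [lsR, hx]
        omega
      have hrcl : e.length = 1 := by rw [hls2] at hrc; simp [htpos] at hrc; omega
      obtain ⟨e1, he⟩ := List.length_eq_one_iff.mp hrcl
      -- decompose: leading ones, then a non-one block, then the rest
      set o := (x :: xs).takeWhile (fun w => w == 1) with hodef
      set dw := (x :: xs).dropWhile (fun w => w == 1) with hdwdef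
      have hsplit : o ++ dw = x :: xs := List.takeWhile_append_dropWhile
      have ho : ∀ w ∈ o, w = 1 := fun w hw => by
        simpa using List.mem_takeWhile_imp hw
      have hone : o ≠ [] := by
        rw [hodef]
        simp [List.takeWhile_cons, hx]
      have hdwne : dw ≠ [] := by
        intro hnil
        have hall : ∀ w ∈ x :: xs, w = 1 := by
          intro w hw
          simpa using List.dropWhile_eq_nil_iff.mp hnil w hw
        rw [lsR_all_ones _ hall] at h1'
        omega
      set z := dw.takeWhile (fun w => !(w == 1)) with hzdef
      set s := dw.dropWhile (fun w => !(w == 1)) with hsdef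
      have hsplit2 : z ++ s = dw := List.takeWhile_append_dropWhile
      have hz : ∀ w ∈ z, w ≠ 1 := fun w hw => by
        simpa using List.mem_takeWhile_imp hw
      obtain ⟨d, ds, hdw⟩ := List.exists_cons_of_ne_nil hdwne
      have hd1 : ¬ d = 1 := by
        have := dropWhile_cons_head_false (fun w => w == 1) (x :: xs) d ds (by rw [← hdwdef]; exact hdw)
        simpa using this
      have hzne : z ≠ [] := by
        rw [hzdef, hdw]
        simp [List.takeWhile_cons, hd1]
      have hpat : (x :: xs) = o ++ (z ++ s) := by rw [hsplit2, hsplit]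
      set a : Int := (o.length : Int) with hadef
      have hapos : 0 < a := by
        have := List.length_pos_of_ne_nil hone
        rw [hadef]
        exact_mod_cast this
      -- first pass
      have hem1 : e = [a] ++ emR 0 s := by
        rw [hedef, hpat, (emR_ones o ho (z ++ s) 0).1]
        rw [show (0 : Int) + (o.length : Int) = a from by omega]
        rw [(emR_nonones z hz hzne s a).1, if_pos hapos]
      have hca1 : t = caR 0 s := by
        rw [htdef, hpat, (emR_ones o ho (z ++ s) 0).2]
        rw [show (0 : Int) + (o.length : Int) = a from by omega]
        rw [(emR_nonones z hz hzne s a).2]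
      have hemn : emR 0 s = [] ∧ e1 = a := by
        rw [he] at hem1
        cases hes : emR 0 s with
        | nil => simp [hes] at hem1; exact ⟨rfl, hem1⟩
        | cons b bs => rw [hes] at hem1; simp at hem1
      have hsne : s ≠ [] := by
        intro hnil
        rw [hnil] at hca1
        simp [caR] at hca1
        omega
      obtain ⟨s0, s', hs0⟩ := List.exists_cons_of_ne_nil hsne
      have hs01 : s0 = 1 := by
        have := dropWhile_cons_head_false (fun w => !(w == 1)) dw s0 s' (by rw [← hsdef]; exact hs0)
        simpa using this
      have hems' : emR 1 s' = [] := by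
        have := hemn.1
        rw [hs0] at this
        simpa [emR, hs01] using this
      have hts : t = (s.length : Int) := by
        rcases emR_nil_of_pos s' 1 one_pos hems' with ⟨_, hca'⟩
        rw [hca1, hs0]
        simp [caR, hs01, hca']
        omega
      -- second pass
      have hem2 : emR t (x :: xs) = [t + a] := by
        rw [hpat, (emR_ones o ho (z ++ s) t).1]
        rw [show t + (o.length : Int) = t + a from by omega]
        rw [(emR_nonones z hz hzne s (t + a)).1, if_pos (by omega), hemn.1]
        simp
      have hca2 : caR t (x :: xs) = t := by
        rw [hpat, (emR_ones o ho (z ++ s) t).2]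
        rw [show t + (o.length : Int) = t + a from by omega]
        rw [(emR_nonones z hz hzne s (t + a)).2, ← hca1]
      have hS : a + t = S := by
        rw [← hsum, he, hemn.2]
        simp
      constructor
      · simp only [circular_1_segments]
        rw [hfold, he, hemn.2, hem2, hca2, if_pos htpos]
        rw [hget0, hgetm1]
        simp only [List.head?_cons, hx, hv1]
        rw [if_pos (by simp [hx, hv1])]
        have : [a] ++ [t + a] ++ [t] = [a, t + a, t] := by simp
        rw [this]
        show PySem.List.sorted [a + [t + a, t].getLastD 0, t + a] (fun x => x) false = [S, S]
        rw [show a + [t + a, t].getLastD 0 = S from by simp [List.getLastD]; omega,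
            show t + a = S from by omega]
        exact PySem.List.sorted_id_eq_of_perm_of_pairwise _ _ (List.Perm.refl _) (by simp)
      · omega
    · -- last is 1, head is not: trailing run, no wrap in A's fix
      have hls : lsR false (x :: xs) = 1 := by rw [← lsR_head_ne x xs hx true]; exact h1'
      have he : e = [] := by rw [hls] at hrc; simpa [htpos] using hrc
      obtain ⟨z, s, hpat, hz, hs⟩ := emR_nil_zero _ (by rw [← hedef, he])
      have hzne : z ≠ [] := by
        intro hnil
        rw [hnil] at hpat
        simp at hpat
        have : x ∈ s := by rw [← hpat]; simp
        exact hx (hs x this)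
      have hca1 : t = caR 0 s := by
        rw [htdef, hpat, (emR_nonones z hz hzne s 0).2]
      have hcas : caR 0 s = (s.length : Int) := by
        have := (emR_ones s hs [] 0).2
        simpa [caR] using this
      have hemz : emR 0 s = [] := by
        have := (emR_ones s hs [] 0).1
        simpa [emR] using this
      have hem2 : emR t (x :: xs) = [t] := by
        rw [hpat, (emR_nonones z hz hzne s t).1, if_pos htpos, hemz]
        simp
      have hca2 : caR t (x :: xs) = t := by
        rw [hpat, (emR_nonones z hz hzne s t).2, ← hca1]
      have hS : t = S := by rw [← hsum, he]; simp
      constructor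
      · simp only [circular_1_segments]
        rw [hfold, he, hem2, hca2, if_pos htpos]
        rw [hget0]
        simp only [List.head?_cons]
        rw [if_neg (by simp [hx])]
        have : ([] : List Int) ++ [t] ++ [t] = [S, S] := by simp [hS]
        rw [this]
        exact PySem.List.sorted_id_eq_of_perm_of_pairwise _ _ (List.Perm.refl _) (by simp)
      · omega
  · -- last element is not 1
    have ht : t = 0 := caR_zero_of_last_ne pattern 0 v hvlast hv1
    have h1x := h1
    rw [hgd, show (v == 1) = false from by simpa using hv1] at h1x
    have hrcl : e.length = 1 := by rw [h1x] at hrc; simpa [ht] using hrc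
    obtain ⟨s1, he⟩ := List.length_eq_one_iff.mp hrcl
    have hs1S : s1 = S := by rw [← hsum, he, ht]; simp
    have hs1pos : 0 < s1 := emR_pos pattern 0 le_rfl s1 (by rw [← hedef, he]; simp)
    have hemt : emR t pattern = [s1] := by rw [ht, ← hedef, he]
    have hcat : caR t pattern = 0 := by
      rw [ht]
      rw [← htdef]
      exact ht
    constructor
    · simp only [circular_1_segments]
      rw [hfold, he, hemt, hcat]
      simp only [hgetm1]
      norm_num [hv1]
      rw [show ([s1, s1] : List Int) = [S, S] from by rw [hs1S]]
      exact PySem.List.sorted_id_eq_of_perm_of_pairwise _ _ (List.Perm.refl _) (by simp)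
    · omega


theorem sum_closed (P : Int) : ∀ k : Nat, 1 ≤ k →
    ((PySem.List.pyRange 1 (k : Int) 1).map (fun n => (P - 3 - 2 * (n - 1)) + 1)).sum
      = ((k : Int) - 1) * (P - (k : Int)) := by
  intro k
  induction k with
  | zero => intro h; omega
  | succ n ihn =>
    intro _
    by_cases hn : 1 ≤ n
    · have hcast : ((n + 1 : Nat) : Int) = (n : Int) + 1 := by push_cast; ring
      rw [hcast, PySem.List.pyRange_one_succ_right (by exact_mod_cast hn : (1:Int) ≤ (n:Int))]
      rw [List.map_append, List.sum_append, ihn hn]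
      simp
      ring
    · have hn0 : n = 0 := by omega
      subst hn0
      rw [show (((0:Nat) + 1 : Nat) : Int) = 1 from rfl, PySem.List.pyRange_one_eq_nil le_rfl]
      simp


-- ===== VERDICT (by name: the statement is the Claim_ definition above) =====
theorem compute_index_spec : Claim_equal_compute_index := by
  intro P pattern _ hpre
  obtain ⟨hne, hcnt⟩ := hpre
  have hls : lsR (pattern.getLastD 0 == 1) pattern = 1 := by
    rw [← zip_countP]; exact hcnt
  obtain ⟨hseg, hS1⟩ := segs_eq pattern hne hls
  have hv : pattern.getLast? = some (pattern.getLast hne) := List.getLast?_eq_getLast hne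
  have hgd : pattern.getLastD 0 = pattern.getLast hne := by
    rw [List.getLastD_eq_getLast?, hv]; rfl
  have hcnt' : ((pattern.getLast hne :: pattern).zip pattern).countP
      (fun q => q.2 == 1 && !(q.1 == 1)) = 1 := by
    rw [← hgd]; exact hcnt
  show compute_index P pattern = compute_index_alt P pattern
  simp only [compute_index, compute_index_alt, hseg, PySem.List.pyGet?_neg_one, hv, hcnt',
    PySem.List.count_eq]
  norm_num
  by_cases hS : List.count 1 pattern = 1
  · simp [hS]
  · rw [if_neg hS, if_neg hS]
    have hsc := sum_closed P (List.count 1 pattern) (by omega)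
    norm_num at hsc
    exact hsc
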